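-- pv_equiv track=rewrite | github.com/Capstone-Projects-2026-spring/piggyback-learning-2 | quizgen/consumers.py | build_segments_from_duration
-- ===== SOURCE A (Python) =====
-- def build_segments_from_duration(
--     duration_seconds: int, interval_seconds: int, start_offset: int = 0
-- ):
--     """
--     Inclusive segments: (0, 59), (60, 119) style or (0,60),(61,120) style?
--     Your FastAPI code does (start, start+interval-1) then next start=end+1.
--     """
--     segments = []
--     start = max(0, int(start_offset))
--     step = max(1, int(interval_seconds))
--     while start <= duration_seconds:
--         end = min(start + step - 1, duration_seconds)
--         segments.append((start, end))
--         if end >= duration_seconds: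
--             break
--         start = end + 1
--     return segments
-- ===== SOURCE B (Python) =====
-- def build_segments_from_duration(
--     duration_seconds: int, interval_seconds: int, start_offset: int = 0
-- ):
--     first = max(0, int(start_offset))
--     step = max(1, int(interval_seconds))
--     if duration_seconds < first:
--         return []
--     # closed-form segment count: floor division instead of test-and-advance
--     k = (duration_seconds - first) // step + 1
--     # build back-to-front: the last segment is clipped at duration_seconds,
--     # every earlier one is a full step wide (no min needed for them)
--     segs = [(first + (k - 1) * step, duration_seconds)]
--     for i in range(k - 2, -1, -1):
--         s = first + i * step
--         segs.insert(0, (s, s + step - 1))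
--     return segs
-- ===== Notes on version B (the rewrite author's own statement) =====
-- stated objective: alternative
-- what changed: Computes the segment count k in closed form by floor division ((duration-first)//step+1), emits the clipped last segment directly, and builds the list back-to-front by prepending full-width segments, instead of A's forward test-and-advance while loop with a min/break per round.
import Mathlib
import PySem

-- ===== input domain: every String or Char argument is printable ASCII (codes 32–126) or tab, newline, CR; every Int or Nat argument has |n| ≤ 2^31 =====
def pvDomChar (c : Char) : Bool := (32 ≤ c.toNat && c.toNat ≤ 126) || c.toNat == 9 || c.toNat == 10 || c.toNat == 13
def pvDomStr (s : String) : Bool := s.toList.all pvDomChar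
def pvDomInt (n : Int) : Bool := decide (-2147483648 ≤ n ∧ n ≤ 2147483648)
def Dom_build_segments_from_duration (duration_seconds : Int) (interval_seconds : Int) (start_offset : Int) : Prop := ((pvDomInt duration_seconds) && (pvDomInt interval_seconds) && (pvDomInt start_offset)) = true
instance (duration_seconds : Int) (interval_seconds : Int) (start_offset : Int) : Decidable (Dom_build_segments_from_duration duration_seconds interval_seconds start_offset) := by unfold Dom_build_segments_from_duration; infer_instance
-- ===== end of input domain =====

-- B computes the segment count in closed form by floor division and builds the
-- list back-to-front by prepending full-width segments (alternative; same cost).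


-- ===== PORT A =====
-- the while loop of A: state = (segments, start); step ≥ 1 is carried as a proof for termination
def pvLoopA (D step : Int) (hstep : 1 ≤ step) (segments : List (Int × Int)) (start : Int) : List (Int × Int) :=
  if _h : start ≤ D then
    if _h2 : min (start + step - 1) D ≥ D then
      segments ++ [(start, min (start + step - 1) D)]
    else
      pvLoopA D step hstep (segments ++ [(start, min (start + step - 1) D)]) (min (start + step - 1) D + 1)
  else segments
termination_by (D + 1 - start).toNat
decreasing_by
  have h1 : start ≤ min (start + step - 1) D := le_min (by omega) (by omega)
  omega

def build_segments_from_duration (duration_seconds : Int) (interval_seconds : Int) (start_offset : Int) : List (Int × Int) :=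
  pvLoopA duration_seconds (max 1 interval_seconds) (le_max_left 1 interval_seconds) [] (max 0 start_offset)

-- ===== PORT B =====
-- the backward insert(0, …) loop of Source B: processes indices n-1, n-2, …, 0, prepending each
def pvPrependB (first step : Int) : Nat → List (Int × Int) → List (Int × Int)
  | 0, acc => acc
  | (i+1), acc => pvPrependB first step i ((first + i * step, first + i * step + step - 1) :: acc)

def build_segments_from_duration_alt (duration_seconds : Int) (interval_seconds : Int) (start_offset : Int) : List (Int × Int) :=
  let first := max 0 start_offset
  let step := max 1 interval_seconds
  if duration_seconds < first then []
  else
    let k : Int := PySem.Int.floordiv (duration_seconds - first) step + 1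
    pvPrependB first step (k - 1).toNat [(first + (k - 1) * step, duration_seconds)]

-- ===== PRECONDITION & SPEC =====
def Spec_build_segments_from_duration (duration_seconds : Int) (interval_seconds : Int) (start_offset : Int) (out : List (Int × Int)) : Prop := out = build_segments_from_duration_alt duration_seconds interval_seconds start_offset
instance (duration_seconds : Int) (interval_seconds : Int) (start_offset : Int) (out : List (Int × Int)) : Decidable (Spec_build_segments_from_duration duration_seconds interval_seconds start_offset out) := by unfold Spec_build_segments_from_duration; infer_instance

-- ===== CLAIM (what is proved, stated in full; the proofs are below) =====
def Claim_equal_build_segments_from_duration : Prop := ∀ (duration_seconds : Int) (interval_seconds : Int) (start_offset : Int), Dom_build_segments_from_duration duration_seconds interval_seconds start_offset → Spec_build_segments_from_duration duration_seconds interval_seconds start_offset (build_segments_from_duration duration_seconds interval_seconds start_offset)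

-- ===== LEMMAS AND PROOFS =====
-- A's loop unrolls to a map over the arithmetic progression of starts
theorem pvLoopA_eq (D step : Int) (hstep : 1 ≤ step) (acc : List (Int × Int)) (start : Int) :
    pvLoopA D step hstep acc start
      = acc ++ (List.range (if start ≤ D then ((D - start) / step).toNat + 1 else 0)).map
          (fun (j : Nat) => (start + (j:Int) * step, min (start + (j:Int) * step + step - 1) D)) := by
  fun_induction pvLoopA D step hstep acc start with
  | case1 acc start h h2 =>
    rw [if_pos h]
    have hq : (D - start) / step = 0 :=
      Int.ediv_eq_zero_of_lt (by omega) (by omega)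
    simp [hq]
  | case2 acc start h h2 ih =>
    rw [ih, if_pos h]
    have hmin : min (start + step - 1) D = start + step - 1 := by omega
    rw [hmin, if_pos (by omega : start + step - 1 + 1 ≤ D)]
    have harg : D - (start + step - 1 + 1) = (D - start) + (-1) * step := by ring
    have hq : (D - (start + step - 1 + 1)) / step = (D - start) / step - 1 := by
      rw [harg, Int.add_mul_ediv_right _ _ (by omega : step ≠ 0)]; ring
    have hge : 1 ≤ (D - start) / step := by
      have hs : 1 * step ≤ D - start := by omega
      exact (Int.le_ediv_iff_mul_le (by omega : (0:Int) < step)).mpr hs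
    have hcnt : ((D - (start + step - 1 + 1)) / step).toNat + 1 + 1 = ((D - start) / step).toNat + 1 := by
      omega
    rw [← hcnt]
    have hsh : ∀ n : Nat, (List.range (n + 1)).map
          (fun (j : Nat) => (start + (j:Int) * step, min (start + (j:Int) * step + step - 1) D))
        = (start, min (start + step - 1) D) ::
          (List.range n).map
          (fun (j : Nat) => (start + step - 1 + 1 + (j:Int) * step,
                     min (start + step - 1 + 1 + (j:Int) * step + step - 1) D)) := by
      intro n
      rw [List.range_succ_eq_map]
      simp only [List.map_cons, List.map_map]
      congr 1
      · simp [hmin]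
      · refine List.map_congr_left (fun j _ => ?_)
        simp only [Function.comp, Prod.mk.injEq]
        push_cast
        refine ⟨by ring, ?_⟩
        congr 1
        ring
    rw [hsh]
    simp
    omega
  | case3 acc start h =>
    rw [if_neg (by omega)]
    simp

-- the backward prepend loop builds exactly the map over List.range
theorem pvPrependB_eq (first step : Int) (n : Nat) (acc : List (Int × Int)) :
    pvPrependB first step n acc
      = (List.range n).map (fun (j : Nat) => (first + (j:Int) * step, first + (j:Int) * step + step - 1)) ++ acc := by
  induction n generalizing acc with
  | zero => simp [pvPrependB]
  | succ m ih =>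
    rw [pvPrependB, ih, List.range_succ]
    simp

-- ===== VERDICT (by name: the statement is the Claim_ definition above) =====
theorem build_segments_from_duration_spec : Claim_equal_build_segments_from_duration := by
  intro D i s0 _
  unfold Spec_build_segments_from_duration build_segments_from_duration build_segments_from_duration_alt
  set first := max 0 s0 with hfirst
  set step := max 1 i with hstep0
  have hstep : (1:Int) ≤ step := le_max_left 1 i
  rw [pvLoopA_eq]
  by_cases h : D < first
  · rw [if_pos h, if_neg (by omega)]; simp
  · rw [if_neg h, if_pos (by omega)]
    rw [PySem.Int.floordiv_eq_ediv_of_pos (by omega : (0:Int) < step)]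
    set q := (D - first) / step with hq
    have hq0 : 0 ≤ q := Int.ediv_nonneg (by omega) (by omega)
    have hmod := Int.emod_nonneg (D - first) (by omega : step ≠ 0)
    have hmodlt := Int.emod_lt_of_pos (D - first) (by omega : (0:Int) < step)
    have hdm := Int.ediv_add_emod (D - first) step
    have hk1 : q + 1 - 1 = q := by ring
    show _ = pvPrependB first step (q + 1 - 1).toNat [(first + (q + 1 - 1) * step, D)]
    rw [hk1, pvPrependB_eq]
    have hrange : (List.range (q.toNat + 1)) = List.range q.toNat ++ [q.toNat] := List.range_succ
    have hcnt : ((D - first) / step).toNat + 1 = q.toNat + 1 := by rw [hq]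
    rw [hcnt, hrange, List.map_append, List.nil_append]
    congr 1
    · refine List.map_congr_left (fun j hj => ?_)
      have hjlt : (j:Int) < q := by
        have := List.mem_range.mp hj; omega
      have hle : first + (j:Int) * step + step - 1 <= D := by
        have h1 : ((j:Int) + 1) * step <= q * step :=
          mul_le_mul_of_nonneg_right (by omega) (by omega)
        have hc : q * step = step * q := mul_comm _ _
        linarith [hdm, hmod]
      show (first + (j:Int) * step, min (first + (j:Int) * step + step - 1) D)
          = (first + (j:Int) * step, first + (j:Int) * step + step - 1)
      rw [min_eq_left hle]
    · simp only [List.map_cons, List.map_nil]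
      have hq' : ((q.toNat : Int)) = q := Int.toNat_of_nonneg hq0
      have hge : D <= first + q * step + step - 1 := by
        have hc : q * step = step * q := mul_comm _ _
        linarith [hdm, hmodlt]
      show [(first + ((q.toNat:Int)) * step, min (first + ((q.toNat:Int)) * step + step - 1) D)]
          = [(first + q * step, D)]
      rw [hq', min_eq_right hge]
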